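-- pv_equiv track=rewrite | github.com/Fare-spec/cours | high-school/magic_square/TDliste2liste/exercice4.py | cree_carre_entier_1_n_carre
-- ===== SOURCE A (Python) =====
-- def cree_carre_entier_1_n_carre(n):
--     carre = []
--     compteur = 1
--     for i in range(n):
--         ligne = []
--         for j in range(n):
--             ligne.append(compteur)
--             compteur += 1
--         carre.append(ligne)
--     return carre
-- ===== SOURCE B (Python) =====
-- def cree_carre_entier_1_n_carre(n):
--     flat = range(1, n * n + 1)
--     return [list(flat[i * n:(i + 1) * n]) for i in range(n)]
-- ===== Notes on version B (the rewrite author's own statement) =====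
-- stated objective: simpler
-- what changed: Replaces the nested loops threading a running counter through every cell with a two-phase build-then-partition: make the flat list 1..n*n once, then slice it into n rows.
import Mathlib
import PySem

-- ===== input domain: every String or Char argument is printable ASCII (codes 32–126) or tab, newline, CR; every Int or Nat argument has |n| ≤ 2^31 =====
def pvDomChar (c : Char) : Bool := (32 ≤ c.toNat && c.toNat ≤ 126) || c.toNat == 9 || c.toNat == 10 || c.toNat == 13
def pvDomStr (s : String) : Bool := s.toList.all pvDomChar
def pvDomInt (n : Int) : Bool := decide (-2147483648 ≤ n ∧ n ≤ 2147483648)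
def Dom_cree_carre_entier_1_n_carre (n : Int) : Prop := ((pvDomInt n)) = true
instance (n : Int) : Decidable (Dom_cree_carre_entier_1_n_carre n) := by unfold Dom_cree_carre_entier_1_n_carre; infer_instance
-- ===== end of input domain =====

-- B builds the flat list 1..n*n once and slices it into rows (build-then-partition),
-- instead of A's nested loops threading a running counter through every cell (objective: simpler).

-- ===== PORT A =====
def cree_carre_entier_1_n_carre (n : Int) : List (List Int) :=
  let res := (PySem.List.pyRange 0 n 1).foldl
    (fun (st : List (List Int) × Int) _i =>
      let inner := (PySem.List.pyRange 0 n 1).foldl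
        (fun (st2 : List Int × Int) _j => (st2.1 ++ [st2.2], st2.2 + 1))
        ([], st.2)
      (st.1 ++ [inner.1], inner.2))
    ([], 1)
  res.1

-- ===== PORT B =====
-- Source B's `flat = range(1, n*n+1)` is a lazy range object of length n*n (n*n ≥ 0 always);
-- `list(flat[a:b])` is the range with slice-resolved bounds: range(1 + clamp(a), 1 + clamp(b)).
-- PySem.List.clampIdx is exactly Python's slice-bound resolution, so this port is exact.
def cree_carre_entier_1_n_carre_alt (n : Int) : List (List Int) :=
  let m := (n * n).toNat
  (PySem.List.pyRange 0 n 1).map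
    (fun i => PySem.List.pyRange
      (1 + (PySem.List.clampIdx m (i * n) : Int))
      (1 + (PySem.List.clampIdx m ((i + 1) * n) : Int)) 1)

-- ===== PRECONDITION & SPEC =====
def Spec_cree_carre_entier_1_n_carre (n : Int) (out : List (List Int)) : Prop := out = cree_carre_entier_1_n_carre_alt n
instance (n : Int) (out : List (List Int)) : Decidable (Spec_cree_carre_entier_1_n_carre n out) := by unfold Spec_cree_carre_entier_1_n_carre; infer_instance

-- ===== CLAIM (what is proved, stated in full; the proofs are below) =====
def Claim_equal_cree_carre_entier_1_n_carre : Prop := ∀ (n : Int), Dom_cree_carre_entier_1_n_carre n → Spec_cree_carre_entier_1_n_carre n (cree_carre_entier_1_n_carre n)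

-- ===== LEMMAS AND PROOFS =====

-- A's inner loop appends c, c+1, … and advances the counter by the list length.
theorem pv_inner_fold (l : List Int) (acc : List Int) (c : Int) :
    l.foldl (fun (st2 : List Int × Int) _ => (st2.1 ++ [st2.2], st2.2 + 1)) (acc, c)
      = (acc ++ (List.range l.length).map (fun (k : Nat) => c + (k:Int)), c + l.length) := by
  induction l generalizing acc c with
  | nil => simp
  | cons x t ih =>
    simp only [List.foldl_cons, ih, List.length_cons, List.range_succ_eq_map,
      List.map_cons, List.map_map, Prod.mk.injEq]
    constructor
    · rw [List.append_assoc, List.singleton_append]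
      congr 1
      rw [List.cons.injEq]
      constructor
      · push_cast; ring
      · apply List.map_congr_left; intro k _
        simp only [Function.comp_apply]; push_cast; ring
    · push_cast; ring

-- A's outer loop: each iteration appends one row of nn consecutive values.
theorem pv_outer_fold (l : List Int) (nn : Nat) (acc : List (List Int)) (c : Int) :
    l.foldl
      (fun (st : List (List Int) × Int) _ =>
        (st.1 ++ [(List.range nn).map (fun (k : Nat) => st.2 + (k:Int))], st.2 + (nn:Int)))
      (acc, c)
      = (acc ++ (List.range l.length).map
          (fun (i : Nat) => (List.range nn).map (fun (k : Nat) => c + (i:Int) * nn + (k:Int))),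
         c + l.length * nn) := by
  induction l generalizing acc c with
  | nil => simp
  | cons x t ih =>
    simp only [List.foldl_cons, ih, List.length_cons, List.range_succ_eq_map,
      List.map_cons, List.map_map, Prod.mk.injEq]
    constructor
    · rw [List.append_assoc, List.singleton_append]
      congr 1
      rw [List.cons.injEq]
      constructor
      · apply List.map_congr_left; intro k _; push_cast; ring
      · apply List.map_congr_left; intro i _
        simp only [Function.comp_apply]
        apply List.map_congr_left; intro k _; push_cast; ring
    · push_cast; ring

-- B's sliced range at row i is exactly the i-th block of N consecutive values.
theorem pv_row (N i : Nat) (hi : i < N) :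
    PySem.List.pyRange
      (1 + (PySem.List.clampIdx (((N:Int) * N).toNat) ((i:Int) * N) : Int))
      (1 + (PySem.List.clampIdx (((N:Int) * N).toNat) (((i:Int) + 1) * N) : Int)) 1
      = (List.range N).map (fun (k : Nat) => 1 + (i:Int) * N + (k:Int)) := by
  have hm : (((N:Int)) * N).toNat = N * N := by
    rw [show (N:Int) * N = ((N*N : Nat):Int) by push_cast; ring, Int.toNat_natCast]
  have c1 : PySem.List.clampIdx (N*N) ((i:Int) * N) = i * N := by
    rw [show (i:Int) * N = ((i*N : Nat):Int) by push_cast; ring, PySem.List.clampIdx_natCast]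
    exact min_eq_left (Nat.mul_le_mul_right N (Nat.le_of_lt hi))
  have c2 : PySem.List.clampIdx (N*N) (((i:Int) + 1) * N) = (i+1) * N := by
    rw [show ((i:Int) + 1) * N = (((i+1)*N : Nat):Int) by push_cast; ring,
      PySem.List.clampIdx_natCast]
    exact min_eq_left (Nat.mul_le_mul_right N hi)
  rw [hm, c1, c2, PySem.List.pyRange_one]
  have hlen : ((1 + (((i+1)*N : Nat):Int)) - (1 + ((i*N : Nat):Int))).toNat = N := by
    rw [show (1 + (((i+1)*N : Nat):Int)) - (1 + ((i*N : Nat):Int)) = ((N : Nat):Int) by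
      push_cast; ring, Int.toNat_natCast]
  rw [hlen]
  apply List.map_congr_left; intro k _; push_cast; ring

theorem pv_main (n : Int) :
    cree_carre_entier_1_n_carre n = cree_carre_entier_1_n_carre_alt n := by
  by_cases hn : n ≤ 0
  · simp [cree_carre_entier_1_n_carre, cree_carre_entier_1_n_carre_alt,
      PySem.List.pyRange_one_eq_nil hn]
  · obtain ⟨N, rfl⟩ : ∃ N : Nat, n = (N:Int) :=
      ⟨n.toNat, (Int.toNat_of_nonneg (le_of_lt (not_le.mp hn))).symm⟩
    have hlen : (PySem.List.pyRange 0 (N:Int) 1).length = N := by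
      rw [PySem.List.length_pyRange_one]; simp
    have hfun : (fun (st : List (List Int) × Int) (_i : Int) =>
        let inner := (PySem.List.pyRange 0 (N:Int) 1).foldl
          (fun (st2 : List Int × Int) _j => (st2.1 ++ [st2.2], st2.2 + 1))
          ([], st.2)
        (st.1 ++ [inner.1], inner.2))
      = (fun (st : List (List Int) × Int) (_i : Int) =>
          (st.1 ++ [(List.range N).map (fun (k : Nat) => st.2 + (k:Int))], st.2 + (N:Int))) := by
      funext st i
      simp only [pv_inner_fold, hlen, List.nil_append]
    have hA : cree_carre_entier_1_n_carre (N:Int) = (List.range N).map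
        (fun (i : Nat) => (List.range N).map (fun (k : Nat) => 1 + (i:Int) * N + (k:Int))) := by
      show ((PySem.List.pyRange 0 (N:Int) 1).foldl _ ([], 1)).1 = _
      rw [show ((PySem.List.pyRange 0 (N:Int) 1).foldl
          (fun (st : List (List Int) × Int) _i =>
            let inner := (PySem.List.pyRange 0 (N:Int) 1).foldl
              (fun (st2 : List Int × Int) _j => (st2.1 ++ [st2.2], st2.2 + 1)) ([], st.2)
            (st.1 ++ [inner.1], inner.2)) ([], 1))
        = ((PySem.List.pyRange 0 (N:Int) 1).foldl
            (fun (st : List (List Int) × Int) (_i : Int) =>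
              (st.1 ++ [(List.range N).map (fun (k : Nat) => st.2 + (k:Int))], st.2 + (N:Int)))
            ([], 1)) from by rw [hfun]]
      rw [pv_outer_fold, hlen]
      simp
    rw [hA]
    show _ = (PySem.List.pyRange 0 (N:Int) 1).map _
    rw [show PySem.List.pyRange 0 (N:Int) 1
        = (List.range N).map (fun (k : Nat) => ((k:Int))) from by
      rw [PySem.List.pyRange_one]; simp]
    rw [List.map_map]
    apply List.map_congr_left
    intro i hi
    rw [List.mem_range] at hi
    simp only [Function.comp]
    rw [pv_row N i hi]

-- ===== VERDICT (by name: the statement is the Claim_ definition above) =====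
theorem cree_carre_entier_1_n_carre_spec : Claim_equal_cree_carre_entier_1_n_carre := by
  intro n _hd
  unfold Spec_cree_carre_entier_1_n_carre
  exact pv_main n
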